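-- pv_equiv track=rewrite | github.com/MrChepe09/Competitive-Programming-Codes | CodeChef April Challenge 2020/COVIDLQ.py | covid
-- ===== SOURCE A (Python) =====
-- def covid(n, a):
--   p = False
--   for j in range(len(a)):
--     if(a[j]==1 and p==False):
--       k = j
--       p=True
--     elif(a[j]==1 and p):
--       if(j-k<6):
--         return "NO"
--       else:
--         k = j
--   return "YES"
-- ===== SOURCE B (Python) =====
-- def covid(n, a):
--     for j, x in enumerate(a):
--         if x == 1 and 1 in a[j+1:j+6]:
--             return "NO"
--     return "YES"
-- ===== Notes on version B (the rewrite author's own statement) =====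
-- stated objective: alternative
-- what changed: Replaces A's stateful scan that tracks the last seen 1 and compares consecutive gaps by a stateless sliding-window containment check: for each position holding a 1, look whether another 1 occurs in the next five cells (a[j+1:j+6]); no cross-iteration state is kept.
import Mathlib
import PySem

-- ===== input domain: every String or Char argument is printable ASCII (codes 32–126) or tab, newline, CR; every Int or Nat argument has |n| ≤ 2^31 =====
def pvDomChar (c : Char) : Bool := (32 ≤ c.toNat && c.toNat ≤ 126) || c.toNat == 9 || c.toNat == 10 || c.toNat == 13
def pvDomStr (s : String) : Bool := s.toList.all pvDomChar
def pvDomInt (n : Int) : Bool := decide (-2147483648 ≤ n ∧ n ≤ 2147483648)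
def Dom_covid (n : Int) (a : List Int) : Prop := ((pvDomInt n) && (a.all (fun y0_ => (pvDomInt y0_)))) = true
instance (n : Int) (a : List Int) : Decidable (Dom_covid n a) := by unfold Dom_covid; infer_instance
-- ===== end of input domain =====

-- B replaces A's stateful last-1-index scan by a stateless sliding-window check
-- (for each 1 at position j, is there a 1 in the slice a[j+1:j+6]?); objective: alternative.

-- ===== PORT A =====
-- A's single scan with flag p (encoded as Option of the last 1-index k) and running index j.
def covidLoop : List Int → Int → Option Int → String
  | [], _, _ => "YES"
  | x :: rest, j, none =>
      if x = 1 then covidLoop rest (j + 1) (some j) else covidLoop rest (j + 1) none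
  | x :: rest, j, some k =>
      if x = 1 then
        (if j - k < 6 then "NO" else covidLoop rest (j + 1) (some j))
      else covidLoop rest (j + 1) (some k)

def covid (n : Int) (a : List Int) : String := covidLoop a 0 none

-- ===== PORT B =====
-- B's loop over enumerate(a): report "NO" when a 1 has another 1 in the slice a[j+1:j+6].
def winLoop (a : List Int) : List (Int × Int) → String
  | [] => "YES"
  | (j, x) :: rest =>
      if x = 1 ∧ 1 ∈ PySem.List.slice a (some (j + 1)) (some (j + 6)) then "NO"
      else winLoop a rest

def covid_alt (n : Int) (a : List Int) : String := winLoop a (PySem.List.enumerate a 0)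

-- ===== PRECONDITION & SPEC =====
def Spec_covid (n : Int) (a : List Int) (out : String) : Prop := out = covid_alt n a
instance (n : Int) (a : List Int) (out : String) : Decidable (Spec_covid n a out) := by unfold Spec_covid; infer_instance

-- ===== CLAIM (what is proved, stated in full; the proofs are below) =====
def Claim_equal_covid : Prop := ∀ (n : Int) (a : List Int), Dom_covid n a → Spec_covid n a (covid n a)

-- ===== LEMMAS AND PROOFS =====

-- positions (offset j) of the 1s in a, and the adjacent-gap check, used only by the proofs
def onesIdx : List Int → Int → List Int
  | [], _ => []
  | x :: rest, j => if x = 1 then j :: onesIdx rest (j + 1) else onesIdx rest (j + 1)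

def pairCheck : List Int → String
  | j :: k :: rest => if k - j < 6 then "NO" else pairCheck (k :: rest)
  | _ => "YES"

theorem covidLoop_pairCheck (a : List Int) :
    ∀ (j : Int) (k : Option Int),
      covidLoop a j k = pairCheck ((k.toList) ++ onesIdx a j) := by
  induction a with
  | nil => intro j k; cases k <;> simp [covidLoop, onesIdx, pairCheck]
  | cons x rest ih =>
      intro j k
      cases k with
      | none =>
          by_cases hx : x = 1 <;> simp [covidLoop, onesIdx, hx, ih]
      | some k0 =>
          by_cases hx : x = 1
          · by_cases hd : j - k0 < 6 <;>
              simp [covidLoop, onesIdx, pairCheck, hx, hd, ih]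
          · simp [covidLoop, onesIdx, hx, ih]

theorem mem_onesIdx (a : List Int) :
    ∀ (j x : Int), x ∈ onesIdx a j ↔
      ∃ (i : Nat) (h : i < a.length), a[i] = 1 ∧ x = j + (i : Int) := by
  induction a with
  | nil => intro j x; simp [onesIdx]
  | cons y rest ih =>
      intro j x
      by_cases hy : y = 1
      · simp only [onesIdx, if_pos hy, List.mem_cons, ih]
        constructor
        · rintro (rfl | ⟨i, h, h1, rfl⟩)
          · exact ⟨0, by simp, by simpa using hy, by simp⟩
          · exact ⟨i + 1, by simpa using Nat.succ_lt_succ h, by simpa using h1, by push_cast; ring⟩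
        · rintro ⟨i, h, h1, rfl⟩
          cases i with
          | zero => left; simp
          | succ i =>
              right
              exact ⟨i, by simpa using h, by simpa using h1, by push_cast; ring⟩
      · simp only [onesIdx, if_neg hy, ih]
        constructor
        · rintro ⟨i, h, h1, rfl⟩
          exact ⟨i + 1, by simpa using Nat.succ_lt_succ h, by simpa using h1, by push_cast; ring⟩
        · rintro ⟨i, h, h1, rfl⟩
          cases i with
          | zero => exact absurd (by simpa using h1) hy
          | succ i =>
              exact ⟨i, by simpa using h, by simpa using h1, by push_cast; ring⟩

theorem onesIdx_lb (a : List Int) : ∀ (j x : Int), x ∈ onesIdx a j → j ≤ x := by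
  induction a with
  | nil => intro j x; simp [onesIdx]
  | cons y rest ih =>
      intro j x h
      by_cases hy : y = 1
      · simp only [onesIdx, if_pos hy, List.mem_cons] at h
        rcases h with rfl | h'
        · exact le_refl _
        · have := ih _ _ h'; omega
      · simp only [onesIdx, if_neg hy] at h
        have := ih _ _ h; omega

theorem onesIdx_pairwise (a : List Int) : ∀ (j : Int), (onesIdx a j).Pairwise (· < ·) := by
  induction a with
  | nil => intro j; simp [onesIdx]
  | cons y rest ih =>
      intro j
      by_cases hy : y = 1
      · simp only [onesIdx, if_pos hy]
        refine List.pairwise_cons.mpr ⟨?_, ih _⟩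
        intro x hx
        have := onesIdx_lb rest (j + 1) x hx; omega
      · simp only [onesIdx, if_neg hy]; exact ih _

theorem pairCheck_yes_iff (l : List Int) :
    pairCheck l = "YES" ↔ l.Pairwise (fun x y => 6 ≤ y - x) := by
  induction l with
  | nil => simp [pairCheck]
  | cons x rest ih =>
      cases rest with
      | nil => simp [pairCheck]
      | cons y r =>
          by_cases hd : y - x < 6
          · simp only [pairCheck, if_pos hd]
            constructor
            · intro h; exact absurd h (by decide)
            · intro h
              have := List.rel_of_pairwise_cons h (List.mem_cons_self)
              omega
          · simp only [pairCheck, if_neg hd]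
            rw [ih]
            constructor
            · intro h
              refine List.pairwise_cons.mpr ⟨?_, h⟩
              intro z hz
              rcases List.mem_cons.mp hz with rfl | hz'
              · omega
              · have := List.rel_of_pairwise_cons h hz'; omega
            · intro h; exact (List.pairwise_cons.mp h).2

theorem pairCheck_cases (l : List Int) : pairCheck l = "YES" ∨ pairCheck l = "NO" := by
  induction l with
  | nil => simp [pairCheck]
  | cons x rest ih =>
      cases rest with
      | nil => simp [pairCheck]
      | cons y r =>
          by_cases hd : y - x < 6
          · simp [pairCheck, hd]
          · simp only [pairCheck, if_neg hd]; exact ih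

theorem winLoop_cases (a : List Int) (l : List (Int × Int)) :
    winLoop a l = "YES" ∨ winLoop a l = "NO" := by
  induction l with
  | nil => simp [winLoop]
  | cons p rest ih =>
      obtain ⟨j, x⟩ := p
      by_cases h : x = 1 ∧ 1 ∈ PySem.List.slice a (some (j + 1)) (some (j + 6))
      · simp [winLoop, h]
      · simp only [winLoop, if_neg h]; exact ih

theorem winLoop_yes_iff (a : List Int) (l : List (Int × Int)) :
    winLoop a l = "YES" ↔
      ∀ p ∈ l, ¬ (p.2 = 1 ∧ 1 ∈ PySem.List.slice a (some (p.1 + 1)) (some (p.1 + 6))) := by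
  induction l with
  | nil => simp [winLoop]
  | cons p rest ih =>
      obtain ⟨j, x⟩ := p
      by_cases h : x = 1 ∧ 1 ∈ PySem.List.slice a (some (j + 1)) (some (j + 6))
      · simp only [winLoop, if_pos h]
        constructor
        · intro hh; exact absurd hh (by decide)
        · intro hh; exact absurd h (hh (j, x) (List.mem_cons_self))
      · simp only [winLoop, if_neg h]
        rw [ih]
        constructor
        · intro hh p hp
          rcases List.mem_cons.mp hp with rfl | hp'
          · exact h
          · exact hh p hp'
        · intro hh p hp; exact hh p (List.mem_cons_of_mem _ hp)

-- the window a[j+1:j+6] at a natural index i contains a 1 iff a 1 sits within the next five cells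
theorem one_mem_window_iff (a : List Int) (i : Nat) :
    1 ∈ PySem.List.slice a (some ((i : Int) + 1)) (some ((i : Int) + 6)) ↔
      ∃ (k : Nat) (h : k < a.length), i < k ∧ k ≤ i + 5 ∧ a[k] = 1 := by
  have h1 : ((i : Int) + 1) = ((i + 1 : Nat) : Int) := by push_cast; ring
  have h6 : ((i : Int) + 6) = (((i + 1 : Nat) : Int) + ((5 : Nat) : Int)) := by push_cast; ring
  rw [h1, h6, PySem.List.slice_natCast_add]
  constructor
  · intro h
    obtain ⟨t, ht, hget⟩ := List.mem_iff_getElem.mp h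
    have hlen : t < 5 ∧ i + 1 + t < a.length := by
      simp only [List.length_take, List.length_drop, lt_min_iff] at ht
      omega
    simp only [List.getElem_take, List.getElem_drop] at hget
    exact ⟨i + 1 + t, hlen.2, by omega, by omega, hget⟩
  · rintro ⟨k, hk, hik, hk5, h1k⟩
    obtain ⟨d, rfl⟩ : ∃ d, k = i + 1 + d := ⟨k - (i + 1), by omega⟩
    apply List.mem_iff_getElem.mpr
    have ht : d < ((a.drop (i + 1)).take 5).length := by
      simp only [List.length_take, List.length_drop, lt_min_iff]
      omega
    refine ⟨d, ht, ?_⟩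
    simp only [List.getElem_take, List.getElem_drop]
    exact h1k

-- no two 1s within distance ≤ 5
def NoClose (a : List Int) : Prop :=
  ∀ (i k : Nat) (hi : i < a.length) (hk : k < a.length),
    a[i] = 1 → i < k → k ≤ i + 5 → a[k] ≠ 1

theorem winLoop_yes_iff_noClose (a : List Int) :
    winLoop a (PySem.List.enumerate a 0) = "YES" ↔ NoClose a := by
  rw [winLoop_yes_iff]
  constructor
  · intro h i k hi hk h1 hik hk5 h1k
    have hp : ((0 : Int) + (i : Int), a[i]) ∈ PySem.List.enumerate a 0 :=
      (PySem.List.mem_enumerate_iff a 0 _).mpr ⟨i, hi, rfl⟩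
    have hh := h _ hp
    simp only [zero_add] at hh
    exact hh ⟨h1, (one_mem_window_iff a i).mpr ⟨k, hk, hik, hk5, h1k⟩⟩
  · intro h p hp
    obtain ⟨i, hi, rfl⟩ := (PySem.List.mem_enumerate_iff a 0 p).mp hp
    simp only [zero_add]
    rintro ⟨h1, hw⟩
    obtain ⟨k, hk, hik, hk5, h1k⟩ := (one_mem_window_iff a i).mp hw
    exact h i k hi hk h1 hik hk5 h1k

theorem pairCheck_yes_iff_noClose (a : List Int) :
    pairCheck (onesIdx a 0) = "YES" ↔ NoClose a := by
  rw [pairCheck_yes_iff]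
  constructor
  · intro h i k hi hk h1 hik hk5 h1k
    have hmi : (i : Int) ∈ onesIdx a 0 := (mem_onesIdx a 0 _).mpr ⟨i, hi, h1, by simp⟩
    have hmk : (k : Int) ∈ onesIdx a 0 := (mem_onesIdx a 0 _).mpr ⟨k, hk, h1k, by simp⟩
    obtain ⟨p, hp, hpg⟩ := List.mem_iff_getElem.mp hmi
    obtain ⟨q, hq, hqg⟩ := List.mem_iff_getElem.mp hmk
    have hpw := List.pairwise_iff_getElem.mp h
    have hs := List.pairwise_iff_getElem.mp (onesIdx_pairwise a 0)
    rcases lt_trichotomy p q with hpq | hpq | hpq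
    · have := hpw p q hp hq hpq
      rw [hpg, hqg] at this; omega
    · subst hpq; rw [hpg] at hqg; omega
    · have := hs q p hq hp hpq
      rw [hpg, hqg] at this; omega
  · intro h
    apply List.pairwise_iff_getElem.mpr
    intro p q hp hq hpq
    have hm1 : (onesIdx a 0)[p] ∈ onesIdx a 0 := List.getElem_mem _
    have hm2 : (onesIdx a 0)[q] ∈ onesIdx a 0 := List.getElem_mem _
    obtain ⟨i, hi, h1, hig⟩ := (mem_onesIdx a 0 _).mp hm1
    obtain ⟨k, hk, h1k, hkg⟩ := (mem_onesIdx a 0 _).mp hm2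
    have hlt : (onesIdx a 0)[p] < (onesIdx a 0)[q] :=
      List.pairwise_iff_getElem.mp (onesIdx_pairwise a 0) p q hp hq hpq
    simp only [zero_add] at hig hkg
    by_contra hbad
    have hik : i < k := by omega
    have hk5 : k ≤ i + 5 := by omega
    exact h i k hi hk h1 hik hk5 h1k

-- ===== VERDICT (by name: the statement is the Claim_ definition above) =====
theorem covid_spec : Claim_equal_covid := by
  intro n a _
  unfold Spec_covid covid covid_alt
  rw [show covidLoop a 0 none = pairCheck (onesIdx a 0) from by
    simpa using covidLoop_pairCheck a 0 none]
  rcases winLoop_cases a (PySem.List.enumerate a 0) with hY | hN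
  · rw [hY]
    exact (pairCheck_yes_iff_noClose a).mpr ((winLoop_yes_iff_noClose a).mp hY)
  · rw [hN]
    rcases pairCheck_cases (onesIdx a 0) with hY' | hN'
    · exfalso
      have hh := (winLoop_yes_iff_noClose a).mpr ((pairCheck_yes_iff_noClose a).mp hY')
      rw [hh] at hN
      exact absurd hN (by decide)
    · exact hN'
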